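-- pv_equiv track=rewrite | github.com/HugoFara/pylinkage | src/pylinkage/topology/enumeration.py | _valid_degree_sequences
-- ===== SOURCE A (Python) =====
-- def _valid_degree_sequences(
--     num_links: int,
--     num_joints: int,
-- ) -> list[tuple[int, ...]]:
--     """Generate all valid link-degree sequences.
--
--     Each link must have degree >= 2 (no pendant links).
--     The sum of degrees = 2 * num_joints.
--     Returns sorted tuples in non-decreasing order.
--     """
--     target_sum = 2 * num_joints
--     results: list[tuple[int, ...]] = []
--
--     def _backtrack(
--         remaining: int,
--         count: int,
--         min_val: int,
--         current: list[int],
--     ) -> None: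
--         if count == 0:
--             if remaining == 0:
--                 results.append(tuple(current))
--             return
--         # Max degree for a simple graph with num_links nodes
--         max_deg = num_links - 1
--         for d in range(min_val, min(remaining - 2 * (count - 1), max_deg) + 1):
--             current.append(d)
--             _backtrack(remaining - d, count - 1, d, current)
--             current.pop()
--
--     _backtrack(target_sum, num_links, 2, [])
--     return results
-- ===== SOURCE B (Python) =====
-- def _valid_degree_sequences(num_links, num_joints):
--     """Breadth-first layered expansion: grow all pruned partial sequences one
--     slot per level, then keep the complete ones that hit the target sum."""
--     max_deg = num_links - 1
--     states = [((), 2 * num_joints)]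
--     for left in range(num_links, 0, -1):
--         if not states:
--             break
--         states = [
--             (prefix + (d,), rem - d)
--             for (prefix, rem) in states
--             for d in range((prefix[-1] if prefix else 2),
--                            min(rem - 2 * (left - 1), max_deg) + 1)
--         ]
--     return [prefix for (prefix, rem) in states
--             if rem == 0 and len(prefix) == num_links]
-- ===== Notes on version B (the rewrite author's own statement) =====
-- stated objective: alternative
-- what changed: Replaces the recursive DFS backtracking with an iterative breadth-first layered expansion: all pruned partial sequences are grown one slot per level in a flat comprehension, and complete sequences hitting the target sum are filtered at the end.
import Mathlib
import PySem

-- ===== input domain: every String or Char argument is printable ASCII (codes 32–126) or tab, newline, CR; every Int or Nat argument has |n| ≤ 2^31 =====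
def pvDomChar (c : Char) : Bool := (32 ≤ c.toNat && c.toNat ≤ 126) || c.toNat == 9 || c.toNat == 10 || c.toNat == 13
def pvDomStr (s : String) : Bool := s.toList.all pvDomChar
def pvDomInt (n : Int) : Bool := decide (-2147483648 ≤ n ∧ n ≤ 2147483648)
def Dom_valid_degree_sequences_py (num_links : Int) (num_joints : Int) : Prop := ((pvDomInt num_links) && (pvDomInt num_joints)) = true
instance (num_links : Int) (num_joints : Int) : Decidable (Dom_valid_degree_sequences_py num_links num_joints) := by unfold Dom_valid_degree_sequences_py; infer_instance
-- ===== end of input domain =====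

-- B replaces A's recursive DFS backtracking by an iterative breadth-first
-- layered expansion of the same pruned partial sequences (alternative, similar cost).


-- ===== PORT A =====
-- A's nested `_backtrack` (mutating `results`/`current`) ported as a recursion
-- returning the appended results; `current.append/…/pop` becomes `current ++ [d]`.
-- CPython raises RecursionError when the recursion depth (num_links frames,
-- reached exactly when num_joints ≥ num_links) hits the default recursion limit
-- of 1000, so the depth is fuel capped at 996 and exhaustion is `none` (= the
-- raise), propagated outward exactly as the exception would be; on every input
-- of Pre_ the fuel is never exhausted and this port equals the Python.
def btA (num_links : Int) : Nat → Int → Int → Int → List Int → Option (List (List Int))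
  | 0, _, _, _, _ => none
  | fuel + 1, remaining, count, min_val, current =>
    if count == 0 then some (if remaining == 0 then [current] else []) else
      let max_deg := num_links - 1
      (PySem.List.pyRange min_val (min (remaining - 2 * (count - 1)) max_deg + 1) 1).foldl
        (fun acc d =>
          match acc with
          | none => none
          | some res =>
            match btA num_links fuel (remaining - d) (count - 1) d (current ++ [d]) with
            | none => none
            | some r => some (res ++ r)) (some [])

-- outside Pre_ (where the Python raises RecursionError) the `.getD []` value is
-- not claimed by any theorem below
def valid_degree_sequences_py (num_links : Int) (num_joints : Int) : List (List Int) :=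
  (btA num_links (min (num_links.toNat + 1) 996) (2 * num_joints) num_links 2 []).getD []

-- ===== PORT B =====
-- one level of the breadth-first expansion (Source B's nested list comprehension)
def stepB (num_links : Int) (states : List (List Int × Int)) (left : Int) : List (List Int × Int) :=
  states.flatMap (fun s =>
    (PySem.List.pyRange (s.1.getLast?.getD 2)
        (min (s.2 - 2 * (left - 1)) (num_links - 1) + 1) 1).map
      (fun d => (s.1 ++ [d], s.2 - d)))

-- the level loop: left counts down num_links, num_links-1, …, 1 (the lazy
-- range(num_links, 0, -1), iterated without materialising it), with Source B's
-- early `break` when no states remain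
def loopB (num_links : Int) : Nat → Int → List (List Int × Int) → List (List Int × Int)
  | 0, _, states => states
  | k + 1, left, states =>
    if states.isEmpty then states else loopB num_links k (left - 1) (stepB num_links states left)

def valid_degree_sequences_py_alt (num_links : Int) (num_joints : Int) : List (List Int) :=
  (loopB num_links num_links.toNat num_links [([], 2 * num_joints)]).filterMap
    (fun s => if s.2 == 0 && (s.1.length : Int) == num_links then some s.1 else none)

-- ===== PRECONDITION & SPEC =====
-- Pre_ excludes exactly the inputs (num_links ≥ 996 with num_joints ≥ num_links) on
-- which A's recursion of depth num_links hits CPython's default recursion limit of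
-- 1000 and raises RecursionError (at the boundary the outcome shifts by one frame
-- with the call depth; 996 is the deepest num_links that returns from every call
-- site); for num_joints < num_links the degree range is empty at the top level, A
-- never recurses and returns normally for every num_links.
def Pre_valid_degree_sequences_py (num_links : Int) (num_joints : Int) : Prop :=
  num_links ≤ 995 ∨ num_joints < num_links
instance (num_links : Int) (num_joints : Int) : Decidable (Pre_valid_degree_sequences_py num_links num_joints) := by unfold Pre_valid_degree_sequences_py; infer_instance
def pvWitness_valid_degree_sequences_py : Int × Int := (5, 5)

def Spec_valid_degree_sequences_py (num_links : Int) (num_joints : Int) (out : List (List Int)) : Prop := out = valid_degree_sequences_py_alt num_links num_joints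
instance (num_links : Int) (num_joints : Int) (out : List (List Int)) : Decidable (Spec_valid_degree_sequences_py num_links num_joints out) := by unfold Spec_valid_degree_sequences_py; infer_instance

-- ===== CLAIM (what is proved, stated in full; the proofs are below) =====
def Claim_equal_valid_degree_sequences_py : Prop := ∀ (num_links : Int) (num_joints : Int), Dom_valid_degree_sequences_py num_links num_joints → Pre_valid_degree_sequences_py num_links num_joints → Spec_valid_degree_sequences_py num_links num_joints (valid_degree_sequences_py num_links num_joints)

-- ===== LEMMAS AND PROOFS =====

-- exception-free core of A's backtracking (proof device only: btA = some btCore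
-- whenever the fuel covers the recursion depth, see btA_eq_some)
def btCore (num_links : Int) : Nat → Int → Int → Int → List Int → List (List Int)
  | 0, _, _, _, _ => []
  | fuel + 1, remaining, count, min_val, current =>
    if count == 0 then (if remaining == 0 then [current] else []) else
      let max_deg := num_links - 1
      (PySem.List.pyRange min_val (min (remaining - 2 * (count - 1)) max_deg + 1) 1).foldl
        (fun acc d => acc ++ btCore num_links fuel (remaining - d) (count - 1) d (current ++ [d])) []

-- when count ≠ 0 and the degree range is empty, one unfolding of btA returns some []
lemma btA_empty_range (nl rem cnt mv : Int) (cur : List Int) (f : Nat) (hcnt : cnt ≠ 0)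
    (hb : min (rem - 2 * (cnt - 1)) (nl - 1) + 1 ≤ mv) :
    btA nl (f + 1) rem cnt mv cur = some [] := by
  simp only [btA]
  rw [if_neg (by simpa using hcnt)]
  rw [PySem.List.pyRange_one_eq_nil hb]
  rfl

-- one-step unfoldings when count ≠ 0 (inner recursive calls left folded)
lemma btA_succ_opt (nl : Int) (f : Nat) (rem c mv : Int) (cur : List Int) (hc : c ≠ 0) :
    btA nl (f + 1) rem c mv cur
      = (PySem.List.pyRange mv (min (rem - 2 * (c - 1)) (nl - 1) + 1) 1).foldl
          (fun acc d =>
            match acc with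
            | none => none
            | some res =>
              match btA nl f (rem - d) (c - 1) d (cur ++ [d]) with
              | none => none
              | some r => some (res ++ r)) (some []) := by
  simp only [btA]
  rw [if_neg (by simpa using hc)]

lemma btCore_succ_foldl (nl : Int) (f : Nat) (rem c mv : Int) (cur : List Int) (hc : c ≠ 0) :
    btCore nl (f + 1) rem c mv cur
      = (PySem.List.pyRange mv (min (rem - 2 * (c - 1)) (nl - 1) + 1) 1).foldl
          (fun acc d => acc ++ btCore nl f (rem - d) (c - 1) d (cur ++ [d])) [] := by
  simp only [btCore]
  rw [if_neg (by simpa using hc)]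

-- the Option foldl of btA with a some accumulator is the pure foldl of btCore
lemma foldl_opt (g : Int → Option (List (List Int))) (fc : Int → List (List Int))
    (hg : ∀ d, g d = some (fc d)) (l : List Int) (res : List (List Int)) :
    l.foldl (fun acc d =>
        match acc with
        | none => none
        | some r => match g d with | none => none | some x => some (r ++ x)) (some res)
      = some (l.foldl (fun acc d => acc ++ fc d) res) := by
  induction l generalizing res with
  | nil => rfl
  | cons d t ih => simp only [List.foldl_cons, hg d]; exact ih (res ++ fc d)

-- with fuel count+1 (enough for the recursion depth) btA never raises
lemma btA_eq_some (nl : Int) (n : Nat) :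
    ∀ (rem mv : Int) (cur : List Int),
      btA nl (n + 1) rem (n : Int) mv cur = some (btCore nl (n + 1) rem (n : Int) mv cur) := by
  induction n with
  | zero => intro rem mv cur; simp [btA, btCore]
  | succ m ih =>
    intro rem mv cur
    have hc : ((m + 1 : Nat) : Int) ≠ 0 := by push_cast; omega
    rw [btA_succ_opt nl (m + 1) rem _ mv cur hc, btCore_succ_foldl nl (m + 1) rem _ mv cur hc]
    rw [foldl_opt _ (fun d => btCore nl (m + 1) (rem - d) (((m + 1 : Nat) : Int) - 1) d (cur ++ [d]))
        (fun d => by rw [show ((m + 1 : Nat) : Int) - 1 = (m : Int) from by push_cast; omega]; exact ih _ _ _)]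

-- one unfolding of btCore when count ≠ 0, with the foldl turned into flatMap
lemma btCore_succ (nl : Int) (f : Nat) (rem c mv : Int) (cur : List Int) (hc : c ≠ 0) :
    btCore nl (f + 1) rem c mv cur
      = (PySem.List.pyRange mv (min (rem - 2 * (c - 1)) (nl - 1) + 1) 1).flatMap
          (fun d => btCore nl f (rem - d) (c - 1) d (cur ++ [d])) := by
  simp only [btCore]
  rw [if_neg (by simpa using hc)]
  rw [PySem.List.foldl_append_eq_flatMap]
  simp

lemma stepB_nil (nl l : Int) : stepB nl [] l = [] := rfl

lemma foldl_stepB_nil (nl : Int) (ls : List Int) : ls.foldl (stepB nl) [] = [] := by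
  induction ls with
  | nil => rfl
  | cons l rest ih => rw [List.foldl_cons, stepB_nil, ih]

lemma loopB_eq_foldl (nl : Int) (k : Nat) (left : Int) (st : List (List Int × Int)) :
    loopB nl k left st = (PySem.List.pyRange left (left - k) (-1)).foldl (stepB nl) st := by
  induction k generalizing left st with
  | zero => rw [PySem.List.pyRange_neg_one_eq_nil (by omega)]; rfl
  | succ k ih =>
    rw [PySem.List.pyRange_neg_one_cons (by push_cast; omega), List.foldl_cons]
    simp only [loopB]
    by_cases hst : st = []
    · subst hst
      simp only [List.isEmpty_nil, if_true, stepB_nil, foldl_stepB_nil]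
    · rw [if_neg (by simpa using hst), ih]
      congr 2
      push_cast
      ring

-- main invariant: running the remaining n levels of B on a state list whose
-- prefixes all have length num_links - n, then filtering, equals A's backtrack
-- launched from each state (min_val = last chosen degree, 2 for the empty prefix)
lemma key (nl : Int) (n : Nat) (S : List (List Int × Int))
    (h : ∀ s ∈ S, (s.1.length : Int) + n = nl) :
    ((PySem.List.pyRange (n : Int) 0 (-1)).foldl (stepB nl) S).filterMap
        (fun s => if s.2 == 0 && (s.1.length : Int) == nl then some s.1 else none)
      = S.flatMap (fun s => btCore nl (n + 1) s.2 (n : Int) (s.1.getLast?.getD 2) s.1) := by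
  induction n generalizing S with
  | zero =>
    rw [PySem.List.pyRange_neg_one_eq_nil (by norm_num)]
    simp only [List.foldl_nil]
    induction S with
    | nil => simp
    | cons s t ih =>
      have hs := h s (by simp)
      simp only [List.filterMap_cons, List.flatMap_cons]
      rw [ih (fun x hx => h x (by simp [hx]))]
      have hlen : ((s.1.length : Int) == nl) = true := by simpa using hs
      simp only [btCore, Nat.cast_zero, beq_self_eq_true, if_true, hlen, Bool.and_true]
      by_cases hr : s.2 = 0
      · simp [hr]
      · simp [hr]
  | succ m ih =>
    rw [PySem.List.pyRange_neg_one_cons (by push_cast; omega)]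
    simp only [List.foldl_cons]
    rw [show ((m + 1 : Nat) : Int) - 1 = (m : Int) from by push_cast; omega]
    rw [ih (stepB nl S ((m + 1 : Nat) : Int))
        (by
          intro x hx
          simp only [stepB, List.mem_flatMap, List.mem_map] at hx
          obtain ⟨s, hs, d, _, rfl⟩ := hx
          have := h s hs
          simp only [List.length_append, List.length_cons, List.length_nil]
          push_cast at this ⊢
          omega)]
    unfold stepB
    rw [List.flatMap_assoc]
    congr 1
    funext s
    rw [btCore_succ nl (m + 1) s.2 ((m + 1 : Nat) : Int) (s.1.getLast?.getD 2) s.1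
        (by push_cast; omega)]
    have hm : ((m + 1 : Nat) : Int) - 1 = (m : Int) := by push_cast; omega
    rw [List.flatMap_map]
    simp only [List.getLast?_concat, Option.getD_some, hm]

-- ===== VERDICT (by name: the statement is the Claim_ definition above) =====
theorem valid_degree_sequences_py_spec : Claim_equal_valid_degree_sequences_py := by
  intro nl nj _ hpre
  unfold Spec_valid_degree_sequences_py valid_degree_sequences_py valid_degree_sequences_py_alt
  by_cases h9 : 0 ≤ nl ∧ nl ≤ 995
  · obtain ⟨hnl, h995⟩ := h9
    rw [show min (nl.toNat + 1) 996 = nl.toNat + 1 from by omega]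
    have he := btA_eq_some nl nl.toNat
    rw [Int.toNat_of_nonneg hnl] at he
    rw [he, Option.getD_some]
    have hk := key nl nl.toNat [([], 2 * nj)]
      (by intro s hs; simp only [List.mem_singleton] at hs; subst hs; simp; omega)
    rw [Int.toNat_of_nonneg hnl] at hk
    rw [loopB_eq_foldl, show nl - (nl.toNat : Int) = 0 from by omega, hk]
    simp
  · -- outside 0 ≤ nl ≤ 995: Pre_ forces either nl < 0, or nl > 995 with nj < nl;
    -- either way the first degree range is already empty and both sides return []
    have hcase : nl < 0 ∨ (995 < nl ∧ nj < nl) := by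
      unfold Pre_valid_degree_sequences_py at hpre
      omega
    have hb : min (2 * nj - 2 * (nl - 1)) (nl - 1) + 1 ≤ 2 := by omega
    have hcnt : nl ≠ 0 := by omega
    obtain ⟨f, hf⟩ : ∃ f, min (nl.toNat + 1) 996 = f + 1 := ⟨min (nl.toNat + 1) 996 - 1, by omega⟩
    rw [hf, btA_empty_range nl (2 * nj) nl 2 [] f hcnt hb, Option.getD_some]
    rcases hcase with hneg | ⟨hbig, _⟩
    · rw [show nl.toNat = 0 from by omega]
      simp only [loopB]
      simp
      omega
    · rw [loopB_eq_foldl, show nl - (nl.toNat : Int) = 0 from by omega,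
        PySem.List.pyRange_neg_one_cons (by omega : (0 : Int) < nl), List.foldl_cons,
        show stepB nl [([], 2 * nj)] nl = [] from by
          simp [stepB, PySem.List.pyRange_one_eq_nil hb],
        foldl_stepB_nil]
      simp
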